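-- pv_equiv track=rewrite | github.com/Nastasia8/AaDS_1_147_2021 | zan3.py | pobochnay
-- ===== SOURCE A (Python) =====
-- def pobochnay(matrix,p):
--   matrix2 =[[0 for i in range(p)] for j in range(p)]
--   for j in range(p):
--     for i in range(p):
--       if j+i==p-1:
--         matrix2[j][i] = matrix[j][i]*2
--       else:
--         matrix2[j][i] = matrix[j][i]
--   return matrix2
-- ===== SOURCE B (Python) =====
-- def pobochnay(matrix, p):
--     out = []
--     for j in range(p):
--         row = matrix[j]
--         k = p - 1 - j
--         out.append(row[:k] + [row[k] * 2] + row[k + 1:p])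
--     return out
-- ===== Notes on version B (the rewrite author's own statement) =====
-- stated objective: alternative
-- what changed: Replaces A's preallocated zero matrix filled by a branched nested per-cell loop with a per-row assembly: each output row is built in one step as prefix slice + doubled anti-diagonal element + suffix slice, with no inner loop and no per-cell branch.
-- outside the precondition, e.g. on pobochnay([[1, 2], [3]], 2): A raises IndexError, B returns [[1, 4], [6]]
import Mathlib
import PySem

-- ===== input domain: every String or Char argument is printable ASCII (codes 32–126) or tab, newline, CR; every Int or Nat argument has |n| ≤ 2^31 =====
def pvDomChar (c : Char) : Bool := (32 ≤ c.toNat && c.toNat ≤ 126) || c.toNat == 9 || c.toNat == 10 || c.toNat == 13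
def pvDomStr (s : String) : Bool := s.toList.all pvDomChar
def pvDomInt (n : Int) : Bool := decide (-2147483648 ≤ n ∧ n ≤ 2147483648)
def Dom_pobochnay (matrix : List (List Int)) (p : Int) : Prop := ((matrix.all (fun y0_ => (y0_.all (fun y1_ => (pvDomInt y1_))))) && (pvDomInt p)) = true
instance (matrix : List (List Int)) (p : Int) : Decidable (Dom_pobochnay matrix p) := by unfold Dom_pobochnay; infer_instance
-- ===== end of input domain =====

-- B builds each output row in one step as prefix slice + doubled anti-diagonal cell + suffix
-- slice, instead of A's branched per-cell nested fill loop over a preallocated zero matrix.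

-- ===== PORT A =====
-- matrix[j][i] is read with pyGetD; Pre_ guarantees the indices are in range, where it is exact
def pobochnay (matrix : List (List Int)) (p : Int) : List (List Int) :=
  let matrix2 := (PySem.List.pyRange 0 p 1).map (fun _ => (PySem.List.pyRange 0 p 1).map (fun _ => (0 : Int)))
  (PySem.List.pyRange 0 p 1).foldl (fun m2 j =>
    (PySem.List.pyRange 0 p 1).foldl (fun m2 i =>
      let v : Int :=
        if j + i = p - 1 then PySem.List.pyGetD (PySem.List.pyGetD matrix j []) i 0 * 2
        else PySem.List.pyGetD (PySem.List.pyGetD matrix j []) i 0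
      m2.set j.toNat ((PySem.List.pyGetD m2 j []).set i.toNat v)) m2) matrix2

-- ===== PORT B =====
-- matrix[j] and row[k] are read with pyGetD; Pre_ guarantees they are in range, where it is exact
def pobochnay_alt (matrix : List (List Int)) (p : Int) : List (List Int) :=
  (PySem.List.pyRange 0 p 1).foldl (fun out j =>
    let row := PySem.List.pyGetD matrix j []
    let k := p - 1 - j
    out ++ [PySem.List.slice row none (some k) ++
            ([PySem.List.pyGetD row k 0 * 2] ++ PySem.List.slice row (some (k + 1)) (some p))]) []

-- ===== PRECONDITION & SPEC =====
-- Pre_ excludes exactly the inputs where Python A raises IndexError (some matrix[j][i] with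
-- 0 ≤ j,i < p missing); A returns normally on every other input.
def Pre_pobochnay (matrix : List (List Int)) (p : Int) : Prop :=
  p ≤ 0 ∨ (p ≤ (matrix.length : Int) ∧ ∀ row ∈ matrix.take p.toNat, p ≤ (row.length : Int))
instance (matrix : List (List Int)) (p : Int) : Decidable (Pre_pobochnay matrix p) := by
  unfold Pre_pobochnay; infer_instance
def pvWitness_pobochnay : List (List Int) × Int := ([[1, 2], [3, 4]], 2)

def Spec_pobochnay (matrix : List (List Int)) (p : Int) (out : List (List Int)) : Prop := out = pobochnay_alt matrix p
instance (matrix : List (List Int)) (p : Int) (out : List (List Int)) : Decidable (Spec_pobochnay matrix p out) := by unfold Spec_pobochnay; infer_instance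

-- ===== CLAIM (what is proved, stated in full; the proofs are below) =====
def Claim_equal_pobochnay : Prop := ∀ (matrix : List (List Int)) (p : Int), Dom_pobochnay matrix p → Pre_pobochnay matrix p → Spec_pobochnay matrix p (pobochnay matrix p)

-- ===== LEMMAS AND PROOFS =====

-- proof-side helper: the (defaulted) cell read both ports perform
def pvCell (matrix : List (List Int)) (j i : Nat) : Int := (matrix.getD j []).getD i 0

theorem pv_pyGetD_nonneg {α : Type} (xs : List α) (j : Int) (d : α) (h : 0 ≤ j) :
    PySem.List.pyGetD xs j d = xs.getD j.toNat d := by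
  have hj : j = (j.toNat : Int) := by omega
  rw [hj, PySem.List.pyGetD_natCast, Int.toNat_natCast]

-- generic loop shape: for j in range(n): acc[j] = g(j, acc[j]), when n ≤ len acc
theorem pv_foldl_set_range {α : Type} (d : α) (g : Nat → α → α) :
    ∀ (n : Nat) (m : List α), n ≤ m.length →
      (List.range n).foldl (fun acc j => acc.set j (g j (acc.getD j d))) m
        = (List.range n).map (fun j => g j (m.getD j d)) ++ m.drop n := by
  intro n
  induction n with
  | zero => intro m _; simp
  | succ k ih =>
    intro m hm
    have hk : k < m.length := by omega
    rw [List.range_succ, List.foldl_append, List.map_append, ih m (by omega)]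
    have hlen : ((List.range k).map (fun j => g j (m.getD j d))).length = k := by simp
    have hdrop : m.drop k = m[k] :: m.drop (k + 1) := List.drop_eq_getElem_cons hk
    have hmk : m.getD k d = m[k] := by
      rw [List.getD, List.getElem?_eq_getElem hk]; rfl
    have hget : (((List.range k).map (fun j => g j (m.getD j d))) ++ m.drop k).getD k d = m[k] := by
      rw [List.getD, List.getElem?_append_right (by omega), hlen, Nat.sub_self, hdrop]
      rfl
    simp only [List.foldl_cons, List.foldl_nil, hget]
    rw [hdrop, List.set_append_right k _ (by omega)]
    have h0 : k - ((List.range k).map (fun j => g j (m.getD j d))).length = 0 := by omega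
    rw [h0, List.set_cons_zero]
    have hgd : m[k]?.getD d = m[k] := by rw [List.getElem?_eq_getElem hk]; rfl
    simp [hgd]

theorem pv_range_cast (p : Int) :
    PySem.List.pyRange 0 p 1 = (List.range p.toNat).map (fun (k : Nat) => (k : Int)) := by
  rw [PySem.List.pyRange_one, Int.sub_zero]
  exact List.map_congr_left (fun k _ => by simp)

-- generic loop shape: for j in L: out.append(f j), starting from []
theorem pv_foldl_append_singleton {α β : Type} (f : α → β) :
    ∀ (L : List α) (acc : List β),
      L.foldl (fun out j => out ++ [f j]) acc = acc ++ L.map f := by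
  intro L
  induction L with
  | nil => intro acc; simp
  | cons a L ih => intro acc; simp [ih]

-- A's nested fill loop computes the per-cell closed form
theorem pobochnay_closed (matrix : List (List Int)) (p : Int) :
    pobochnay matrix p = (List.range p.toNat).map (fun (j : Nat) => (List.range p.toNat).map (fun (i : Nat) =>
      if (j : Int) + (i : Int) = p - 1 then pvCell matrix j i * 2 else pvCell matrix j i)) := by
  simp only [pvCell]
  unfold pobochnay
  rw [pv_range_cast]
  simp only [List.foldl_map, List.map_map, Function.comp_def, PySem.List.pyGetD_natCast,
    Int.toNat_natCast]
  refine Eq.trans (b := (List.range p.toNat).foldl (fun m2 j =>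
      m2.set j ((List.range p.toNat).foldl (fun r i => r.set i
        (if (j : Int) + (i : Int) = p - 1 then (matrix.getD j []).getD i 0 * 2
         else (matrix.getD j []).getD i 0)) (m2.getD j [])))
      ((List.range p.toNat).map (fun _ => (List.range p.toNat).map (fun _ => (0 : Int))))) ?_ ?_
  · -- each outer iteration only rewrites row j of the state
    have inner : ∀ (j : Nat) (L : List Nat) (m2 : List (List Int)), j < m2.length →
        L.foldl (fun m2 i => m2.set j ((m2.getD j []).set i
          (if (j : Int) + (i : Int) = p - 1 then (matrix.getD j []).getD i 0 * 2
           else (matrix.getD j []).getD i 0))) m2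
          = m2.set j (L.foldl (fun r i => r.set i
              (if (j : Int) + (i : Int) = p - 1 then (matrix.getD j []).getD i 0 * 2
               else (matrix.getD j []).getD i 0)) (m2.getD j [])) := by
      intro j L
      induction L with
      | nil =>
        intro m2 hj
        simp only [List.foldl_nil]
        rw [List.getD, List.getElem?_eq_getElem hj]
        exact (List.set_getElem_self hj).symm
      | cons a L ih =>
        intro m2 hj
        simp only [List.foldl_cons]
        rw [ih _ (by simpa using hj), List.set_set]
        congr 2
        rw [List.getD, List.getElem?_set_self hj, Option.getD_some, List.getD]
    have outer : ∀ (L : List Nat) (m : List (List Int)), m.length = p.toNat →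
        (∀ j ∈ L, j < p.toNat) →
        L.foldl (fun m2 j => (List.range p.toNat).foldl (fun m2 i =>
          m2.set j ((m2.getD j []).set i
            (if (j : Int) + (i : Int) = p - 1 then (matrix.getD j []).getD i 0 * 2
             else (matrix.getD j []).getD i 0))) m2) m
        = L.foldl (fun m2 j => m2.set j ((List.range p.toNat).foldl (fun r i => r.set i
            (if (j : Int) + (i : Int) = p - 1 then (matrix.getD j []).getD i 0 * 2
             else (matrix.getD j []).getD i 0)) (m2.getD j []))) m := by
      intro L
      induction L with
      | nil => intro m _ _; rfl
      | cons a L ih =>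
        intro m hm hL
        simp only [List.foldl_cons]
        rw [inner a _ m (by rw [hm]; exact hL a (by simp))]
        exact ih _ (by simp [hm]) (fun j hj => hL j (by simp [hj]))
    exact outer _ _ (by simp) (fun j hj => by simpa using hj)
  · rw [pv_foldl_set_range ([]) (fun j r => (List.range p.toNat).foldl (fun r i => r.set i
        (if (j : Int) + (i : Int) = p - 1 then (matrix.getD j []).getD i 0 * 2
         else (matrix.getD j []).getD i 0)) r) p.toNat
        ((List.range p.toNat).map (fun _ => (List.range p.toNat).map (fun _ => (0 : Int)))) (by simp)]
    rw [List.drop_eq_nil_of_le (by simp), List.append_nil]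
    apply List.map_congr_left
    intro j hj
    have hjn : j < p.toNat := by simpa using hj
    have hrow : ((List.range p.toNat).map
        (fun _ => (List.range p.toNat).map (fun _ => (0 : Int)))).getD j []
        = (List.range p.toNat).map (fun _ => (0 : Int)) := by
      rw [List.getD, List.getElem?_eq_getElem (by simpa using hjn), Option.getD_some]
      simp
    rw [hrow, pv_foldl_set_range (0 : Int) (g := fun i _ =>
      if (j : Int) + (i : Int) = p - 1 then (matrix.getD j []).getD i 0 * 2
      else (matrix.getD j []).getD i 0) p.toNat _ (by simp)]
    rw [List.drop_eq_nil_of_le (by simp), List.append_nil]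

-- B's slice assembly computes a per-row closed form (no precondition needed)
theorem pobochnay_alt_closed (matrix : List (List Int)) (p : Int) :
    pobochnay_alt matrix p = (List.range p.toNat).map (fun (j : Nat) =>
      (matrix.getD j []).take (p.toNat - 1 - j) ++
        ([(matrix.getD j []).getD (p.toNat - 1 - j) 0 * 2] ++
          ((matrix.getD j []).drop (p.toNat - 1 - j + 1)).take
            (p.toNat - (p.toNat - 1 - j + 1)))) := by
  unfold pobochnay_alt
  rw [pv_range_cast, List.foldl_map, pv_foldl_append_singleton, List.nil_append]
  apply List.map_congr_left
  intro j hj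
  have hjn : j < p.toNat := by simpa using hj
  have hk0 : (0 : Int) ≤ p - 1 - (j : Int) := by omega
  have hktn : (p - 1 - (j : Int)).toNat = p.toNat - 1 - j := by omega
  have hk1 : (0 : Int) ≤ p - 1 - (j : Int) + 1 := by omega
  have hp0 : (0 : Int) ≤ p := by omega
  rw [pv_pyGetD_nonneg matrix (j : Nat) [] (by positivity), Int.toNat_natCast]
  rw [pv_pyGetD_nonneg _ _ _ hk0, hktn]
  rw [PySem.List.slice_to _ hk0, hktn]
  have hktn1 : (p - 1 - (j : Int) + 1).toNat = p.toNat - 1 - j + 1 := by omega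
  rw [PySem.List.slice_toNat _ hk1 hp0, hktn1]

-- with Pre_ in force, B's assembled row equals A's branched row
theorem pv_rows_eq (p : Int) (hp : 0 < p) (j : Nat) (hj : j < p.toNat)
    (row : List Int) (hrow : p ≤ (row.length : Int)) :
    row.take (p.toNat - 1 - j) ++
      ([row.getD (p.toNat - 1 - j) 0 * 2] ++
        (row.drop (p.toNat - 1 - j + 1)).take (p.toNat - (p.toNat - 1 - j + 1)))
    = (List.range p.toNat).map (fun (i : Nat) =>
        if (j : Int) + (i : Int) = p - 1 then row.getD i 0 * 2 else row.getD i 0) := by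
  set n := p.toNat with hn
  have hpn : (n : Int) = p := by omega
  set k := n - 1 - j with hkdef
  have hkn : k < n := by omega
  have hlen : n ≤ row.length := by omega
  have hgd : ∀ i : Nat, ∀ _ : i < n, row.getD i 0 = row[i]'(by omega) := by
    intro i hi
    rw [List.getD, List.getElem?_eq_getElem (by omega)]; rfl
  have hmin : min k row.length = k := by omega
  apply List.ext_getElem
  · simp only [List.length_append, List.length_take, List.length_cons, List.length_nil,
      List.length_drop, List.length_map, List.length_range]
    omega
  intro i h1 h2
  have hin : i < n := by simpa using h2
  simp only [List.getElem_map, List.getElem_range, List.getElem_append, List.length_take,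
    List.length_cons, List.length_nil, List.getElem_take, List.getElem_cons, List.getElem_drop,
    hmin]
  by_cases hlt : i < k
  · rw [dif_pos hlt, if_neg (show ¬((j : Int) + (i : Int) = p - 1) by omega)]
    rw [hgd i hin]
  · by_cases heq : i = k
    · rw [dif_neg hlt, dif_pos (show i - k < 0 + 1 by omega), dif_pos (show i - k = 0 by omega),
        if_pos (show (j : Int) + (i : Int) = p - 1 by omega), heq]
    · rw [dif_neg hlt, dif_neg (show ¬(i - k < 0 + 1) by omega),
        if_neg (show ¬((j : Int) + (i : Int) = p - 1) by omega)]
      simp only [show k + 1 + (i - k - (0 + 1)) = i from by omega, hgd i hin]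

-- ===== VERDICT (by name: the statement is the Claim_ definition above) =====
theorem pobochnay_spec : Claim_equal_pobochnay := by
  intro matrix p _ hpre
  unfold Spec_pobochnay
  rw [pobochnay_closed, pobochnay_alt_closed]
  by_cases hp : 0 < p
  · apply List.map_congr_left
    intro j hj
    have hjn : j < p.toNat := by simpa using hj
    simp only [pvCell]
    have hjm : j < matrix.length := by
      rcases hpre with h | ⟨h1, _⟩ <;> omega
    have hrow : p ≤ ((matrix.getD j []).length : Int) := by
      rcases hpre with h | ⟨h1, h2⟩
      · omega
      · have hmem : matrix.getD j [] ∈ matrix.take p.toNat := by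
          rw [List.getD, List.getElem?_eq_getElem hjm, Option.getD_some]
          exact List.mem_take_iff_getElem.mpr ⟨j, by omega, rfl⟩
        exact h2 _ hmem
    exact (pv_rows_eq p hp j hjn (matrix.getD j []) hrow).symm
  · have h0 : p.toNat = 0 := by omega
    simp [h0]
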